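-- pv_equiv track=rewrite | github.com/HODLKONG64/the-brain | wiki-citation-checker.py | _remove_lines_containing_url
-- ===== SOURCE A (Python) =====
-- def _remove_lines_containing_url(wikitext: str, dead_url: str) -> str:
--     """
--     Remove all lines from *wikitext* that contain *dead_url*.
--
--     This covers bullet points, ref tags, and bare citation lines.
--     Blank lines left adjacent are collapsed to a single blank line.
--     """
--     lines = wikitext.splitlines()
--     filtered = [line for line in lines if dead_url not in line]
--     # Collapse runs of blank lines into at most one blank line.
--     result: list = []
--     prev_blank = False
--     for line in filtered:
--         is_blank = not line.strip()
--         if is_blank and prev_blank: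
--             continue
--         result.append(line)
--         prev_blank = is_blank
--     return "\n".join(result)
-- ===== SOURCE B (Python) =====
-- def _remove_lines_containing_url(wikitext: str, dead_url: str) -> str:
--     """Remove lines containing dead_url; collapse adjacent blank lines.
--
--     Stateless formulation: a kept line is dropped only when it is blank
--     and its predecessor among the kept lines is also blank, so we pair
--     each surviving line with its predecessor and filter in one pass.
--     """
--     filtered = [line for line in wikitext.splitlines() if dead_url not in line]
--     kept = [line for prev, line in zip([None] + filtered, filtered)
--             if prev is None or line.strip() or prev.strip()]
--     return "\n".join(kept)
-- ===== Notes on version B (the rewrite author's own statement) =====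
-- stated objective: simpler
-- what changed: Replaces A's stateful loop with a prev_blank flag and an appended accumulator by a stateless one-pass comprehension that pairs each surviving line with its predecessor (zip with a None-prefixed copy) and keeps a line unless both it and its predecessor are blank.
import Mathlib
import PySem

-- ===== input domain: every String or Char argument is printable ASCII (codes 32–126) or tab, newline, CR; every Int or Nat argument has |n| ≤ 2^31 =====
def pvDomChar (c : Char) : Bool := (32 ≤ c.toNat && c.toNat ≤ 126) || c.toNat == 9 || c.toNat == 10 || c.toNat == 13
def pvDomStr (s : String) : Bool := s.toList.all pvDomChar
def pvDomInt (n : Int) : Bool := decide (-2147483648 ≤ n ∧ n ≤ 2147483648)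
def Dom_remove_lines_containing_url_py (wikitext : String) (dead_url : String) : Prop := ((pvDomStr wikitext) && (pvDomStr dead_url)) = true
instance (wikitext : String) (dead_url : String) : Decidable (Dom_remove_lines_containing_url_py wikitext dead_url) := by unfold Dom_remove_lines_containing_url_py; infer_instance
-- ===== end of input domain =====

-- B replaces A's stateful prev_blank loop by a stateless pairwise filter (each line zipped with its predecessor); objective: simpler.

-- ===== PORT A =====
def remove_lines_containing_url_py (wikitext : String) (dead_url : String) : String :=
  let lines := PySem.Str.splitlines wikitext
  let filtered := lines.filter (fun line => !(PySem.Str.isIn dead_url line))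
  let res := filtered.foldl
    (fun (st : List String × Bool) line =>
      let is_blank := PySem.Str.strip line == ""
      if is_blank && st.2 then st
      else (st.1 ++ [line], is_blank))
    ([], false)
  PySem.Str.join "\n" res.1

-- ===== PORT B =====
def remove_lines_containing_url_py_alt (wikitext : String) (dead_url : String) : String :=
  let filtered := (PySem.Str.splitlines wikitext).filter (fun line => !(PySem.Str.isIn dead_url line))
  let kept := ((((none : Option String) :: filtered.map some).zip filtered).filter
      (fun pl => pl.1.isNone || !(PySem.Str.strip pl.2 == "") || !(PySem.Str.strip (pl.1.getD "") == ""))).map (·.2)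
  PySem.Str.join "\n" kept

-- ===== PRECONDITION & SPEC =====
def Spec_remove_lines_containing_url_py (wikitext : String) (dead_url : String) (out : String) : Prop := out = remove_lines_containing_url_py_alt wikitext dead_url
instance (wikitext : String) (dead_url : String) (out : String) : Decidable (Spec_remove_lines_containing_url_py wikitext dead_url out) := by unfold Spec_remove_lines_containing_url_py; infer_instance

-- ===== CLAIM (what is proved, stated in full; the proofs are below) =====
def Claim_equal_remove_lines_containing_url_py : Prop := ∀ (wikitext : String) (dead_url : String), Dom_remove_lines_containing_url_py wikitext dead_url → Spec_remove_lines_containing_url_py wikitext dead_url (remove_lines_containing_url_py wikitext dead_url)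

-- ===== LEMMAS AND PROOFS =====

-- A's loop body, named for the proofs (the port keeps it inline; definitionally equal)
def pvStep (st : List String × Bool) (line : String) : List String × Bool :=
  let is_blank := PySem.Str.strip line == ""
  if is_blank && st.2 then st
  else (st.1 ++ [line], is_blank)

-- prev_blank corresponding to an optional predecessor line
def pvPrevBlank : Option String → Bool
  | none => false
  | some s => PySem.Str.strip s == ""

def pvCond (pl : Option String × String) : Bool :=
  pl.1.isNone || !(PySem.Str.strip pl.2 == "") || !(PySem.Str.strip (pl.1.getD "") == "")

-- A's loop, started with prev_blank = pvPrevBlank prev, produces exactly B's pairwise filter.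
lemma pv_loop_eq (fs : List String) : ∀ (acc : List String) (prev : Option String),
    (fs.foldl pvStep (acc, pvPrevBlank prev)).1
    = acc ++ (((prev :: fs.map some).zip fs).filter pvCond).map (·.2) := by
  induction fs with
  | nil => intro acc prev; simp
  | cons l rest ih =>
    intro acc prev
    rw [List.foldl_cons]
    cases prev with
    | none =>
      have hfold : pvStep (acc, pvPrevBlank none) l = (acc ++ [l], pvPrevBlank (some l)) := by
        simp [pvStep, pvPrevBlank]
      rw [hfold, ih (acc ++ [l]) (some l)]
      simp [pvCond]
    | some s =>
      by_cases hl : PySem.Str.strip l = "" <;> by_cases hs : PySem.Str.strip s = ""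
      · -- l blank, predecessor blank: A skips l, B's filter drops the pair
        have hfold : pvStep (acc, pvPrevBlank (some s)) l = (acc, pvPrevBlank (some l)) := by
          simp [pvStep, pvPrevBlank, hl, hs]
        rw [hfold, ih acc (some l)]
        simp [pvCond, hl, hs]
      · have hfold : pvStep (acc, pvPrevBlank (some s)) l = (acc ++ [l], pvPrevBlank (some l)) := by
          simp [pvStep, pvPrevBlank, hs]
        rw [hfold, ih (acc ++ [l]) (some l)]
        simp [pvCond, hs]
      · have hfold : pvStep (acc, pvPrevBlank (some s)) l = (acc ++ [l], pvPrevBlank (some l)) := by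
          simp [pvStep, pvPrevBlank, hl]
        rw [hfold, ih (acc ++ [l]) (some l)]
        simp [pvCond, hl]
      · have hfold : pvStep (acc, pvPrevBlank (some s)) l = (acc ++ [l], pvPrevBlank (some l)) := by
          simp [pvStep, pvPrevBlank, hl]
        rw [hfold, ih (acc ++ [l]) (some l)]
        simp [pvCond, hl]

-- ===== VERDICT (by name: the statement is the Claim_ definition above) =====
theorem remove_lines_containing_url_py_spec : Claim_equal_remove_lines_containing_url_py := by
  intro wikitext dead_url _
  unfold Spec_remove_lines_containing_url_py
  unfold remove_lines_containing_url_py remove_lines_containing_url_py_alt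
  exact congrArg (PySem.Str.join "\n")
    ((pv_loop_eq
      ((PySem.Str.splitlines wikitext).filter (fun line => !(PySem.Str.isIn dead_url line))) [] none).trans (List.nil_append _))
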